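-- pv_equiv track=rewrite | github.com/daniel-reich/turbo-robot | SaZodzHyFoSv9XKPX_12.py | domino_chain
-- ===== SOURCE A (Python) =====
-- def domino_chain(dominos):
--   output = ''
--   seen = []
--   for i in range(len(dominos)):
--     if dominos[i] == '|' and ' ' not in seen and '/' not in seen:
--       output += '/'
--       seen.append(dominos[i])
--     else:
--       output += dominos[i]
--       seen.append(dominos[i])
--   return output
-- ===== SOURCE B (Python) =====
-- def domino_chain(dominos):
--     # Stage 1: cut point = first ' ' or '/' (C-level scans), len if absent.
--     cuts = [i for i in (dominos.find(' '), dominos.find('/')) if i != -1]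
--     cut = min(cuts) if cuts else len(dominos)
--     # Stage 2: bulk-replace '|' in the prefix, suffix untouched.
--     return dominos[:cut].replace('|', '/') + dominos[cut:]
-- ===== Notes on version B (the rewrite author's own statement) =====
-- stated objective: faster
-- what changed: A makes one per-character Python loop that consults a growing history list and concatenates strings; B is staged bulk work: str.find locates the cut point (first ' ' or '/'), then str.replace maps '|'->'/' on the prefix slice and the untouched suffix is appended.
import Mathlib
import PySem

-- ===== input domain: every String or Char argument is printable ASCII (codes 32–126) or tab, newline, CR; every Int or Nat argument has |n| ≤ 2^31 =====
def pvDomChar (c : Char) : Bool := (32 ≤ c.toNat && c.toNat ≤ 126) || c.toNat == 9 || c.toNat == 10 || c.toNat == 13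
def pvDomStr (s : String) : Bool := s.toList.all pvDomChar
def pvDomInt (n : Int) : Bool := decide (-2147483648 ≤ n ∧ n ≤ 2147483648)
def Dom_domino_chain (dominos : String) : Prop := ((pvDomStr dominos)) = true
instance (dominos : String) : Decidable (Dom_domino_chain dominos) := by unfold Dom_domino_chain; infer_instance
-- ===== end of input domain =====

-- B replaces A's per-character Python loop (growing history list consulted each step, string concatenation) by two stages of bulk string operations: find the cut point (first ' ' or '/') with str.find, then str.replace '|'->'/' on the prefix slice and append the untouched suffix (measured faster).


-- ===== PORT A =====
-- pyGetD with default ' ' is exact: i drawn from range(len(cs)) is always in range.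
def domino_chain (dominos : String) : String :=
  let cs := dominos.toList
  let st := (PySem.List.pyRange 0 (cs.length : Int) 1).foldl
    (fun (st : List Char × List Char) i =>
      let c := PySem.List.pyGetD cs i ' '
      if c = '|' ∧ ' ' ∉ st.2 ∧ '/' ∉ st.2 then
        (st.1 ++ ['/'], st.2 ++ [c])
      else
        (st.1 ++ [c], st.2 ++ [c]))
    ([], [])
  String.mk st.1

-- ===== PORT B =====
-- s.find(c) / min / s.replace and the slices are ported with their PySem primitives (Chars side of Str.find/replace; exact).
def domino_chain_alt (dominos : String) : String :=
  let cs := dominos.toList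
  let cuts := ([PySem.Chars.find cs [' '], PySem.Chars.find cs ['/']]).filter
    (fun k => !(k == -1))
  let cut : Int :=
    match PySem.List.min? cuts (fun k => k) with
    | some m => m
    | none => (cs.length : Int)
  String.mk (PySem.Chars.replace (PySem.List.slice cs none (some cut)) ['|'] ['/']
    ++ PySem.List.slice cs (some cut) none)

-- ===== PRECONDITION & SPEC =====
def Spec_domino_chain (dominos : String) (out : String) : Prop := out = domino_chain_alt dominos
instance (dominos : String) (out : String) : Decidable (Spec_domino_chain dominos out) := by unfold Spec_domino_chain; infer_instance

-- ===== CLAIM (what is proved, stated in full; the proofs are below) =====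
def Claim_equal_domino_chain : Prop := ∀ (dominos : String), Dom_domino_chain dominos → Spec_domino_chain dominos (domino_chain dominos)

-- ===== LEMMAS AND PROOFS =====

-- A's loop body (over the character list)
def pvStepA (st : List Char × List Char) (c : Char) : List Char × List Char :=
  if c = '|' ∧ ' ' ∉ st.2 ∧ '/' ∉ st.2 then
    (st.1 ++ ['/'], st.2 ++ [c])
  else
    (st.1 ++ [c], st.2 ++ [c])

lemma pvA_dead (l : List Char) (out seen : List Char)
    (h : ' ' ∈ seen ∨ '/' ∈ seen) :
    (l.foldl pvStepA (out, seen)).1 = out ++ l := by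
  induction l generalizing out seen with
  | nil => simp
  | cons c t ih =>
    have hc : ¬ (c = '|' ∧ ' ' ∉ seen ∧ '/' ∉ seen) := by
      rcases h with h | h <;> simp [h]
    simp only [List.foldl_cons, pvStepA, if_neg hc]
    rw [ih _ _ (by rcases h with h | h <;> simp [h])]
    simp

lemma pvA_live (l : List Char) (out seen : List Char)
    (h1 : ' ' ∉ seen) (h2 : '/' ∉ seen) :
    (l.foldl pvStepA (out, seen)).1 =
      out ++ (l.takeWhile (fun ch => !(ch = ' ' || ch = '/'))).map
              (fun ch => if ch = '|' then '/' else ch)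
          ++ l.dropWhile (fun ch => !(ch = ' ' || ch = '/')) := by
  induction l generalizing out seen with
  | nil => simp
  | cons c t ih =>
    by_cases hb : c = ' ' ∨ c = '/'
    · rcases hb with rfl | rfl <;>
      · simp only [List.foldl_cons, pvStepA]
        rw [if_neg (by simp)]
        rw [pvA_dead t _ _ (by simp)]
        simp [List.takeWhile_cons, List.dropWhile_cons]
    · push_neg at hb
      have hq : (fun ch => !(ch = ' ' || ch = '/')) c = true := by simp [hb.1, hb.2]
      have h1' : ' ' ∉ seen ++ [c] := by
        simp only [List.mem_append, List.mem_singleton, not_or]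
        exact ⟨h1, Ne.symm hb.1⟩
      have h2' : '/' ∉ seen ++ [c] := by
        simp only [List.mem_append, List.mem_singleton, not_or]
        exact ⟨h2, Ne.symm hb.2⟩
      have hqc : (!(decide (c = ' ') || decide (c = '/'))) = true := by
        simp [hb.1, hb.2]
      by_cases hp : c = '|'
      · simp only [List.foldl_cons, pvStepA, if_pos (show c = '|' ∧ ' ' ∉ seen ∧ '/' ∉ seen from ⟨hp, h1, h2⟩)]
        rw [ih _ _ h1' h2']
        simp only [List.takeWhile_cons, List.dropWhile_cons, hqc, if_true]
        simp [hp]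
      · have hc : ¬ (c = '|' ∧ ' ' ∉ seen ∧ '/' ∉ seen) := by simp [hp]
        simp only [List.foldl_cons, pvStepA, if_neg hc]
        rw [ih _ _ h1' h2']
        simp only [List.takeWhile_cons, List.dropWhile_cons, hqc, if_true]
        simp [hp]

lemma pvCut_take_drop (l : List Char) :
    (l.take (match l.findIdx? (fun ch => ch = ' ' || ch = '/') with
              | some i => i | none => l.length)
      = l.takeWhile (fun ch => !(ch = ' ' || ch = '/'))) ∧
    (l.drop (match l.findIdx? (fun ch => ch = ' ' || ch = '/') with
              | some i => i | none => l.length)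
      = l.dropWhile (fun ch => !(ch = ' ' || ch = '/'))) := by
  induction l with
  | nil => simp
  | cons c t ih =>
    by_cases hb : c = ' ' ∨ c = '/'
    · rcases hb with rfl | rfl <;> simp [List.findIdx?_cons, List.takeWhile_cons, List.dropWhile_cons]
    · push_neg at hb
      have hbb : ((fun ch => decide (ch = ' ') || decide (ch = '/')) c) = false := by
        simp [hb.1, hb.2]
      simp only [List.findIdx?_cons, hbb, cond_false]
      have hqc : (!(decide (c = ' ') || decide (c = '/'))) = true := by
        simp [hb.1, hb.2]
      rcases hfi : t.findIdx? (fun ch => ch = ' ' || ch = '/') with _ | i <;>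
        simp only [hfi] at ih <;>
        simp only [hfi, Option.map_none, Option.map_some] <;>
        constructor <;>
        simp only [List.length_cons, List.take_succ_cons, List.drop_succ_cons,
          List.takeWhile_cons, List.dropWhile_cons, hqc, if_true, reduceIte, Bool.false_eq_true, if_false,
          ih.1, ih.2]


lemma pvReplace_go (fuel : Nat) (l acc : List Char) (h : l.length ≤ fuel) :
    PySem.Chars.replace.go ['|'] ['/'] fuel l acc
      = acc.reverse ++ l.map (fun ch => if ch = '|' then '/' else ch) := by
  induction fuel generalizing l acc with
  | zero =>
    have : l = [] := List.eq_nil_of_length_eq_zero (Nat.le_zero.mp h)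
    subst this
    simp [PySem.Chars.replace.go]
  | succ f ih =>
    cases l with
    | nil => simp [PySem.Chars.replace.go]
    | cons c t =>
      by_cases hc : c = '|'
      · subst hc
        rw [show PySem.Chars.replace.go ['|'] ['/'] (f+1) ('|' :: t) acc
              = PySem.Chars.replace.go ['|'] ['/'] f t ('/' :: acc) by
            simp [PySem.Chars.replace.go, List.isPrefixOf]]
        rw [ih t ('/' :: acc) (by simpa using Nat.lt_succ_iff.mp (by simpa using h))]
        simp
      · rw [show PySem.Chars.replace.go ['|'] ['/'] (f+1) (c :: t) acc
              = PySem.Chars.replace.go ['|'] ['/'] f t (c :: acc) by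
            simp only [PySem.Chars.replace.go, List.isPrefixOf]
            simp
            intro e
            exact absurd e.symm hc]
        rw [ih t (c :: acc) (by simpa using Nat.lt_succ_iff.mp (by simpa using h))]
        simp [hc]

lemma pvReplace_map (l : List Char) :
    PySem.Chars.replace l ['|'] ['/'] = l.map (fun ch => if ch = '|' then '/' else ch) := by
  rw [show PySem.Chars.replace l ['|'] ['/'] = PySem.Chars.replace.go ['|'] ['/'] l.length l [] by
      simp [PySem.Chars.replace]]
  simpa using pvReplace_go l.length l [] le_rfl

lemma pvFind_go (c : Char) (l : List Char) (k : Nat) :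
    PySem.Chars.find.go [c] l k
      = match l.findIdx? (fun ch => ch = c) with
        | some i => ((k + i : Nat) : Int)
        | none => -1 := by
  induction l generalizing k with
  | nil => simp [PySem.Chars.find.go]
  | cons h t ih =>
    by_cases hc : h = c
    · subst hc
      simp [PySem.Chars.find.go, List.isPrefixOf, List.findIdx?_cons]
    · rw [show PySem.Chars.find.go [c] (h :: t) k = PySem.Chars.find.go [c] t (k + 1) by
        simp only [PySem.Chars.find.go, List.isPrefixOf]
        simp
        intro e
        exact absurd e.symm hc]
      rw [ih]
      have hcb : ((fun ch => decide (ch = c)) h) = false := by simp [hc]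
      simp only [List.findIdx?_cons, hcb, cond_false, Bool.false_eq_true, if_false, reduceIte]
      rcases t.findIdx? (fun ch => ch = c) with _ | i <;> simp <;> push_cast <;> ring

lemma pvFind_char (c : Char) (l : List Char) :
    PySem.Chars.find l [c]
      = match l.findIdx? (fun ch => ch = c) with
        | some i => (i : Int)
        | none => -1 := by
  rw [show PySem.Chars.find l [c] = PySem.Chars.find.go [c] l 0 by simp [PySem.Chars.find]]
  rw [pvFind_go]
  rcases l.findIdx? (fun ch => ch = c) with _ | i <;> simp

def pvOmin : Option Nat → Option Nat → Option Nat
  | some a, some b => some (min a b)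
  | some a, none => some a
  | none, b => b

lemma pvFindIdx_or (p q : Char → Bool) (l : List Char) :
    l.findIdx? (fun ch => p ch || q ch) = pvOmin (l.findIdx? p) (l.findIdx? q) := by
  induction l with
  | nil => simp [pvOmin]
  | cons c t ih =>
    by_cases hp : p c = true <;> by_cases hq : q c = true <;>
      simp [List.findIdx?_cons, hp, hq, ih] <;>
      rcases t.findIdx? p with _ | i <;> rcases t.findIdx? q with _ | j <;>
        simp [pvOmin, Nat.succ_min_succ]

lemma pvCut_eq (cs : List Char) :
    (match PySem.List.min? (([PySem.Chars.find cs [' '], PySem.Chars.find cs ['/']]).filter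
        (fun k => !(k == -1))) (fun k => k) with
      | some m => m
      | none => (cs.length : Int))
    = (((match cs.findIdx? (fun ch => ch = ' ' || ch = '/') with
        | some i => i
        | none => cs.length) : Nat) : Int) := by
  rw [pvFind_char, pvFind_char, pvFindIdx_or]
  rcases cs.findIdx? (fun ch => decide (ch = ' ')) with _ | a <;>
    rcases cs.findIdx? (fun ch => decide (ch = '/')) with _ | b
  · simp [pvOmin, PySem.List.min?]
  · have : ¬((b : Int) = -1) := by omega
    simp [pvOmin, PySem.List.min?, this]
  · have : ¬((a : Int) = -1) := by omega
    simp [pvOmin, PySem.List.min?, this]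
  · have ha : ¬((a : Int) = -1) := by omega
    have hb : ¬((b : Int) = -1) := by omega
    simp only [pvOmin]
    by_cases hab : (b : Int) < (a : Int)
    · have : min a b = b := by omega
      simp [PySem.List.min?, ha, hb, hab, this]
    · have : min a b = a := by omega
      simp [PySem.List.min?, ha, hb, hab, this]

-- ===== VERDICT (by name: the statement is the Claim_ definition above) =====
theorem domino_chain_spec : Claim_equal_domino_chain := by
  intro dominos _
  unfold Spec_domino_chain domino_chain domino_chain_alt
  show String.mk _ = String.mk _
  rw [PySem.List.foldl_pyRange_zero_pyGetD' dominos.toList ' '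
        (fun (st : List Char × List Char) c =>
          if c = '|' ∧ ' ' ∉ st.2 ∧ '/' ∉ st.2 then
            (st.1 ++ ['/'], st.2 ++ [c])
          else
            (st.1 ++ [c], st.2 ++ [c])) ([], [])]
  rw [pvCut_eq, PySem.List.slice_to_natCast, PySem.List.slice_from_natCast,
      (pvCut_take_drop dominos.toList).1, (pvCut_take_drop dominos.toList).2,
      pvReplace_map]
  have hA := pvA_live dominos.toList [] [] (by simp) (by simp)
  rw [List.nil_append] at hA
  exact congrArg String.mk hA
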